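-- pv_equiv track=rewrite | github.com/justdoths-dev/trading-bot | src/research/diagnostics/recent_vs_wide_strategy_quality_diagnosis_report.py | _select_max_row_pair
-- ===== SOURCE A (Python) =====
-- from collections import Counter, defaultdict
-- from typing import Any, Sequence
--
-- def _select_max_row_pair(
--     summaries: Sequence[dict[str, Any]],
-- ) -> tuple[dict[str, Any], dict[str, Any]] | None:
--     by_window: dict[int, list[dict[str, Any]]] = defaultdict(list)
--     for summary in summaries:
--         window_hours = int(
--             _safe_dict(summary.get("configuration")).get("latest_window_hours", 0) or 0
--         )
--         by_window[window_hours].append(summary)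
--
--     candidate_pairs: list[tuple[dict[str, Any], dict[str, Any]]] = []
--     for same_window_summaries in by_window.values():
--         if len(same_window_summaries) < 2:
--             continue
--         ordered = sorted(
--             same_window_summaries,
--             key=lambda item: int(
--                 _safe_dict(item.get("configuration")).get("latest_max_rows", 0) or 0
--             ),
--         )
--         candidate_pairs.append((ordered[0], ordered[-1]))
--
--     if not candidate_pairs:
--         return None
--
--     return max(
--         candidate_pairs,
--         key=lambda pair: (
--             int(
--                 _safe_dict(pair[1].get("configuration")).get(
--                     "latest_window_hours", 0
--                 )
--                 or 0
--             ),
--             int(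
--                 _safe_dict(pair[1].get("configuration")).get("latest_max_rows", 0)
--                 or 0
--             ),
--         ),
--     )
--
-- def _safe_dict(value: Any) -> dict[str, Any]:
--     if isinstance(value, dict):
--         return value
--     return {}
-- ===== SOURCE B (Python) =====
-- from collections import Counter
-- from typing import Any, Sequence
--
--
-- def _cfg_int(summary: Any, key: str) -> int:
--     cfg = summary.get("configuration")
--     if not isinstance(cfg, dict):
--         cfg = {}
--     return int(cfg.get(key, 0) or 0)
--
--
-- def _select_max_row_pair(
--     summaries: Sequence[dict[str, Any]],
-- ) -> tuple[dict[str, Any], dict[str, Any]] | None: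
--     counts = Counter(_cfg_int(s, "latest_window_hours") for s in summaries)
--     eligible = [w for w, c in counts.items() if c >= 2]
--     if not eligible:
--         return None
--     target = max(eligible)
--     lo = hi = None
--     for s in summaries:
--         if _cfg_int(s, "latest_window_hours") != target:
--             continue
--         r = _cfg_int(s, "latest_max_rows")
--         if lo is None or r < lo[1]:
--             lo = (s, r)
--         if hi is None or r >= hi[1]:
--             hi = (s, r)
--     return (lo[0], hi[0])
-- ===== Notes on version B (the rewrite author's own statement) =====
-- stated objective: simpler
-- what changed: Instead of grouping summaries into per-window lists, sorting every group of size >= 2 and taking a lexicographic max over all (min,max) candidate pairs, B counts windows in one pass, picks the single winning window (the largest with count >= 2) directly, and then finds the first-occurrence minimum and last-occurrence maximum by latest_max_rows in one scan of that window's summaries, with no sorting and no candidate-pair list.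
import Mathlib
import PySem

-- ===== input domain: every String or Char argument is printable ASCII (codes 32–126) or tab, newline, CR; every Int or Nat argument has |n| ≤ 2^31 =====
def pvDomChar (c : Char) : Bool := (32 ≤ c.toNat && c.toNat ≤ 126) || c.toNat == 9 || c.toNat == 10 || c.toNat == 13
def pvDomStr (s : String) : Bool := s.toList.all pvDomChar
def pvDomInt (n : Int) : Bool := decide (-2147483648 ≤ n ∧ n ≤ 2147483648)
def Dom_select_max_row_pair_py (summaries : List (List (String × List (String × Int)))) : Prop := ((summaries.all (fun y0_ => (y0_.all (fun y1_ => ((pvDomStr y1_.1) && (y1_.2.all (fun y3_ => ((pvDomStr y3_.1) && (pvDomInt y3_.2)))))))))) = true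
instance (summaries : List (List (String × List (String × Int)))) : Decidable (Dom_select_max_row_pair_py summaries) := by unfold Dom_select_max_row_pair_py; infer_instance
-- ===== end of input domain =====

-- ===== PORT A =====
-- B picks the winning window first and reduces only that group in one scan; A groups, sorts every group and maximises over candidate pairs (objective: simpler).
-- shared transliteration of `int(_safe_dict(x.get("configuration")).get(key, 0) or 0)`:
-- dict lookup is first-match on the association list; values are Int, so `v or 0` is `v`.
def pvLookup {a : Type} (d : List (String × a)) (k : String) : Option a :=
  (d.find? (fun p => p.1 == k)).map (fun p => p.2)

def pvWk (s : List (String × List (String × Int))) : Int :=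
  (pvLookup ((pvLookup s "configuration").getD []) "latest_window_hours").getD 0

def pvRk (s : List (String × List (String × Int))) : Int :=
  (pvLookup ((pvLookup s "configuration").getD []) "latest_max_rows").getD 0

def select_max_row_pair_py (summaries : List (List (String × List (String × Int)))) : Option ((List (String × List (String × Int))) × (List (String × List (String × Int)))) :=
  -- by_window: defaultdict(list) grouping loop
  let by_window := summaries.foldl
    (fun d s => PySem.Dict.modify d (pvWk s) [] (fun g => g ++ [s])) PySem.Dict.empty
  -- candidate_pairs loop over by_window.values()
  let candidate_pairs := by_window.values.foldl
    (fun acc g =>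
      if g.length < 2 then acc
      else
        let ordered := PySem.List.sorted g pvRk
        match PySem.List.pyGet? ordered 0, PySem.List.pyGet? ordered (-1) with
        | some a, some b => acc ++ [(a, b)]
        | _, _ => acc) []
  -- max(candidate_pairs, key=pair -> tuple): Python compares the 2-tuple key lexicographically,
  -- so the running-max loop is hand-ported with an explicit lexicographic strict comparison.
  match candidate_pairs with
  | [] => none
  | p :: rest =>
      some (rest.foldl
        (fun best q =>
          if pvWk best.2 < pvWk q.2 then q
          else if pvWk q.2 = pvWk best.2 ∧ pvRk best.2 < pvRk q.2 then q
          else best) p)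

-- ===== PORT B =====
def select_max_row_pair_py_alt (summaries : List (List (String × List (String × Int)))) : Option ((List (String × List (String × Int))) × (List (String × List (String × Int)))) :=
  -- counts = Counter(window of s for s in summaries)
  let counts := PySem.Dict.counter (summaries.map pvWk)
  -- eligible = [w for w, c in counts.items() if c >= 2]
  let eligible := counts.items.foldl (fun acc wc => if 2 ≤ wc.2 then acc ++ [wc.1] else acc) []
  -- if not eligible: return None; target = max(eligible)
  match PySem.List.max? eligible (fun w => w) with
  | none => none
  | some target =>
    -- one scan: lo = first-occurrence min, hi = last-occurrence max by latest_max_rows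
    let st := summaries.foldl
      (fun (st : Option ((List (String × List (String × Int))) × Int) × Option ((List (String × List (String × Int))) × Int)) s =>
        if pvWk s ≠ target then st
        else
          let r := pvRk s
          let lo := match st.1 with
            | none => some (s, r)
            | some l => if r < l.2 then some (s, r) else some l
          let hi := match st.2 with
            | none => some (s, r)
            | some h => if h.2 ≤ r then some (s, r) else some h
          (lo, hi)) (none, none)
    match st.1 with
    | none => none
    | some l =>
      match st.2 with
      | none => none
      | some h => some (l.1, h.1)

-- ===== PRECONDITION & SPEC =====
def Spec_select_max_row_pair_py (summaries : List (List (String × List (String × Int)))) (out : Option ((List (String × List (String × Int))) × (List (String × List (String × Int))))) : Prop := out = select_max_row_pair_py_alt summaries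
instance (summaries : List (List (String × List (String × Int)))) (out : Option ((List (String × List (String × Int))) × (List (String × List (String × Int))))) : Decidable (Spec_select_max_row_pair_py summaries out) := by
  unfold Spec_select_max_row_pair_py
  exact @Option.instDecidableEq _ (@instDecidableEqProd _ _ (fun _ _ => inferInstance) (fun _ _ => inferInstance)) _ _

-- ===== CLAIM (what is proved, stated in full; the proofs are below) =====
def Claim_equal_select_max_row_pair_py : Prop := ∀ (summaries : List (List (String × List (String × Int)))), Dom_select_max_row_pair_py summaries → Spec_select_max_row_pair_py summaries (select_max_row_pair_py summaries)

-- ===== LEMMAS AND PROOFS =====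

-- generic grouping dict
def pvGD {α β : Type} (key : α → Int) (v0 : β) (upd : β → α → β) (xs : List α) : PySem.Dict Int β :=
  ⟨(PySem.List.dedup (xs.map key)).map (fun w => (w, (xs.filter (fun s => key s == w)).foldl upd v0))⟩

theorem pv_dedup_append {x : Int} (L : List Int) :
    PySem.List.dedup (L ++ [x]) =
      (if x ∈ L then PySem.List.dedup L else PySem.List.dedup L ++ [x]) := by
  have h1 : PySem.List.dedup (L ++ [x]) = PySem.Set.add (PySem.Set.ofList L) x := by
    simp [PySem.List.dedup, PySem.Set.ofList, List.foldl_append]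
  have h2 : (PySem.Set.ofList L).contains x = (decide (x ∈ L)) := by
    simp [PySem.Set.contains, PySem.Set.mem_ofList]
  rw [h1, PySem.Set.add, h2]
  by_cases h : x ∈ L <;> simp [h]

theorem pv_find?_beq_mem {L : List Int} {k : Int} (h : k ∈ L) :
    L.find? (fun w => w == k) = some k := by
  induction L with
  | nil => cases h
  | cons a t ih =>
    by_cases ha : a = k
    · subst ha; simp
    · have : k ∈ t := by cases h with | head => exact absurd rfl ha | tail _ h' => exact h'
      simp [ha, ih this]

theorem pv_find?_beq_not_mem {L : List Int} {k : Int} (h : k ∉ L) :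
    L.find? (fun w => w == k) = none := by
  simp only [List.find?_eq_none]
  intro x hx
  simp only [beq_iff_eq]
  rintro rfl; exact h hx

theorem pv_keys_pvGD {α β : Type} (key : α → Int) (v0 : β) (upd : β → α → β) (xs : List α)
    {p : Int × β} (hp : p ∈ (pvGD key v0 upd xs).items) : p.1 ∈ xs.map key := by
  simp only [pvGD] at hp
  rcases List.mem_map.1 hp with ⟨w, hw, rfl⟩
  exact (PySem.Set.mem_ofList _ _).1 hw

theorem pvGD_modify {α β : Type} (key : α → Int) (v0 : β) (upd : β → α → β) (xs : List α) (s : α) :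
    PySem.Dict.modify (pvGD key v0 upd xs) (key s) v0 (fun b => upd b s) = pvGD key v0 upd (xs ++ [s]) := by
  apply PySem.Dict.ext
  have hfind : ((pvGD key v0 upd xs).items).find? (fun p => p.1 == key s)
      = ((PySem.List.dedup (xs.map key)).find? (fun w => w == key s)).map
          (fun w => (w, (xs.filter (fun t => key t == w)).foldl upd v0)) := by
    simp only [pvGD, List.find?_map]; rfl
  have hval : ∀ w, ((xs ++ [s]).filter (fun t => key t == w))
      = xs.filter (fun t => key t == w) ++ (if key s = w then [s] else []) := by
    intro w; by_cases h : key s = w <;> simp [List.filter_append, h]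
  by_cases hk : key s ∈ xs.map key
  · have hmem : key s ∈ PySem.List.dedup (xs.map key) := (PySem.Set.mem_ofList _ _).2 hk
    have hget : (pvGD key v0 upd xs).getD (key s) v0
        = (xs.filter (fun t => key t == key s)).foldl upd v0 := by
      rw [PySem.Dict.getD, PySem.Dict.get?, hfind, pv_find?_beq_mem hmem]
      rfl
    have hcont : (pvGD key v0 upd xs).contains (key s) = true := by
      simp only [PySem.Dict.contains, List.any_eq_true]
      refine ⟨(key s, (xs.filter (fun t => key t == key s)).foldl upd v0), ?_, by simp⟩
      simp only [pvGD]
      exact List.mem_map.2 ⟨key s, hmem, rfl⟩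
    rw [PySem.Dict.modify, hget, PySem.Dict.insert, if_pos hcont]
    have hded : PySem.List.dedup ((xs ++ [s]).map key) = PySem.List.dedup (xs.map key) := by
      rw [List.map_append, List.map_cons, List.map_nil, pv_dedup_append, if_pos hk]
    show ((pvGD key v0 upd xs).items.map _) = _
    simp only [pvGD, List.map_map, hded]
    apply List.map_congr_left
    intro w hw
    by_cases hwk : w = key s
    · subst hwk
      simp [hval, List.foldl_append]
    · have h1 : (w == key s) = false := by simp [hwk]
      have h2 : ¬ (key s = w) := Ne.symm hwk
      simp [Function.comp, h1, hval, h2]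
  · have hmem : key s ∉ PySem.List.dedup (xs.map key) := fun h => hk ((PySem.Set.mem_ofList _ _).1 h)
    have hget : (pvGD key v0 upd xs).getD (key s) v0 = v0 := by
      rw [PySem.Dict.getD, PySem.Dict.get?, hfind, pv_find?_beq_not_mem hmem]
      rfl
    have hcont : (pvGD key v0 upd xs).contains (key s) = false := by
      simp only [PySem.Dict.contains, List.any_eq_false]
      intro p hp
      have hin := pv_keys_pvGD key v0 upd xs hp
      simp only [beq_iff_eq]
      exact fun he => hk (he ▸ hin)
    rw [PySem.Dict.modify, hget, PySem.Dict.insert, hcont]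
    simp only [Bool.false_eq_true, if_false]
    have hded : PySem.List.dedup ((xs ++ [s]).map key)
        = PySem.List.dedup (xs.map key) ++ [key s] := by
      rw [List.map_append, List.map_cons, List.map_nil, pv_dedup_append, if_neg hk]
    show ((pvGD key v0 upd xs).items ++ _) = _
    simp only [pvGD, hded]
    rw [List.map_append]
    congr 1
    · apply List.map_congr_left
      intro w hw
      have hwk : ¬ (key s = w) := by
        rintro rfl; exact hk ((PySem.Set.mem_ofList _ _).1 hw)
      simp [hval, hwk]
    · have hfil : xs.filter (fun t => key t == key s) = [] := by
        rw [List.filter_eq_nil_iff]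
        intro t ht
        simp only [beq_iff_eq]
        exact fun he => hk (he ▸ List.mem_map_of_mem ht)
      simp [hval, hfil]

theorem pvGD_foldl {α β : Type} (key : α → Int) (v0 : β) (upd : β → α → β) :
    ∀ (rest xs : List α),
      rest.foldl (fun d s => PySem.Dict.modify d (key s) v0 (fun b => upd b s)) (pvGD key v0 upd xs)
        = pvGD key v0 upd (xs ++ rest) := by
  intro rest
  induction rest with
  | nil => intro xs; simp
  | cons s t ih =>
    intro xs
    simp only [List.foldl_cons, pvGD_modify]
    rw [ih (xs ++ [s])]
    simp

theorem pvGD_nil {α β : Type} (key : α → Int) (v0 : β) (upd : β → α → β) :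
    pvGD key v0 upd ([] : List α) = PySem.Dict.empty := by
  apply PySem.Dict.ext
  simp [pvGD, PySem.List.dedup, PySem.Set.ofList, PySem.Dict.empty]

abbrev PvS := List (String × List (String × Int))

def pvGrp (summaries : List PvS) (w : Int) : List PvS :=
  summaries.filter (fun s => pvWk s == w)

def pvLo (g : List PvS) : PvS :=
  match g with
  | [] => []
  | x :: t => t.foldl (fun b s => if pvRk s < pvRk b then s else b) x

def pvHi (g : List PvS) : PvS :=
  match g with
  | [] => []
  | x :: t => t.foldl (fun b s => if pvRk b ≤ pvRk s then s else b) x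

def pvEs (summaries : List PvS) : List Int :=
  (PySem.List.dedup (summaries.map pvWk)).filter (fun w => decide (2 ≤ (pvGrp summaries w).length))

def pvPair (summaries : List PvS) (w : Int) : PvS × PvS :=
  (pvLo (pvGrp summaries w), pvHi (pvGrp summaries w))

theorem pv_getLast?_cons_ne {α : Type} (y : α) {l : List α} (h : l ≠ []) :
    (y :: l).getLast? = l.getLast? := by
  cases l with
  | nil => exact absurd rfl h
  | cons a t => simp [List.getLast?_cons_cons]

theorem pv_insertBy_ne_nil {α : Type} (before : α → α → Bool) (x : α) (ys : List α) :
    PySem.List.insertBy before x ys ≠ [] := by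
  cases ys with
  | nil => simp [PySem.List.insertBy]
  | cons y t =>
    simp only [PySem.List.insertBy]
    split <;> simp

theorem pv_getLast?_insertBy {α : Type} (before : α → α → Bool) (x : α) (ys : List α) :
    (PySem.List.insertBy before x ys).getLast? = if ys.any (before x) then ys.getLast? else some x := by
  induction ys with
  | nil => simp [PySem.List.insertBy]
  | cons y t ih =>
    simp only [PySem.List.insertBy]
    by_cases hb : before x y
    · simp [hb, List.getLast?_cons_cons]
    · simp only [hb, Bool.false_eq_true, if_false, List.any_cons, Bool.false_or]
      have hne := pv_insertBy_ne_nil before x t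
      rw [pv_getLast?_cons_ne y hne, ih]
      by_cases ha : t.any (before x)
      · have htne : t ≠ [] := by
          rcases List.any_eq_true.1 ha with ⟨z, hz, _⟩
          exact List.ne_nil_of_mem hz
        rw [if_pos ha, if_pos ha, pv_getLast?_cons_ne y htne]
      · simp [ha]

theorem pv_head?_insertBy {α : Type} (before : α → α → Bool) (x : α) (y : α) (t : List α) :
    (PySem.List.insertBy before x (y :: t)).head? = if before x y then some x else some y := by
  simp only [PySem.List.insertBy]
  split <;> simp

theorem pv_sorted_append {α : Type} (g : List α) (x : α) (key : α → Int) :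
    PySem.List.sorted (g ++ [x]) key
      = PySem.List.insertBy (fun a b => decide (key a < key b)) x (PySem.List.sorted g key) := by
  rw [PySem.List.sorted_eq_foldl_insertBy, PySem.List.sorted_eq_foldl_insertBy, List.foldl_append]
  rfl

theorem pv_sorted_le_getLast {α : Type} (g : List α) (key : α → Int) {m y : α}
    (hm : (PySem.List.sorted g key).getLast? = some m) (hy : y ∈ PySem.List.sorted g key) :
    key y ≤ key m := by
  rcases List.mem_iff_getElem.1 hy with ⟨i, hi, rfl⟩
  have hlen : (PySem.List.sorted g key).length - 1 < (PySem.List.sorted g key).length := by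
    omega
  have hml : m = (PySem.List.sorted g key)[(PySem.List.sorted g key).length - 1] := by
    rw [List.getLast?_eq_getElem?] at hm
    rw [List.getElem?_eq_getElem hlen] at hm
    exact (Option.some_inj.1 hm).symm
  rw [hml]
  exact PySem.List.key_sorted_getElem_mono g key (by omega) hlen

theorem pv_lo_append {g : List PvS} (x : PvS) (h : g ≠ []) :
    pvLo (g ++ [x]) = if pvRk x < pvRk (pvLo g) then x else pvLo g := by
  cases g with
  | nil => exact absurd rfl h
  | cons y t => simp [pvLo, List.foldl_append]

theorem pv_hi_append {g : List PvS} (x : PvS) (h : g ≠ []) :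
    pvHi (g ++ [x]) = if pvRk (pvHi g) ≤ pvRk x then x else pvHi g := by
  cases g with
  | nil => exact absurd rfl h
  | cons y t => simp [pvHi, List.foldl_append]

theorem pv_sorted_ends (g : List PvS) (h : g ≠ []) :
    (PySem.List.sorted g pvRk).head? = some (pvLo g)
      ∧ (PySem.List.sorted g pvRk).getLast? = some (pvHi g) := by
  induction g using List.reverseRecOn with
  | nil => exact absurd rfl h
  | append_singleton g x ih =>
    by_cases hg : g = []
    · subst hg
      constructor <;> simp [PySem.List.sorted_eq_foldl_insertBy, PySem.List.insertBy, pvLo, pvHi]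
    · obtain ⟨ihh, ihl⟩ := ih hg
      have hsne : PySem.List.sorted g pvRk ≠ [] := by
        simpa [PySem.List.sorted_eq_nil_iff] using hg
      rw [pv_sorted_append]
      constructor
      · rcases hs : PySem.List.sorted g pvRk with _ | ⟨y, t⟩
        · exact absurd hs hsne
        · rw [pv_head?_insertBy]
          have hy : y = pvLo g := by
            rw [hs] at ihh; simpa using ihh
          rw [pv_lo_append x hg, hy]
          by_cases hc : pvRk x < pvRk (pvLo g) <;> simp [hc]
      · rw [pv_getLast?_insertBy, pv_hi_append x hg]
        have hany : ((PySem.List.sorted g pvRk).any fun y => decide (pvRk x < pvRk y))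
            = decide (¬ (pvRk (pvHi g) ≤ pvRk x)) := by
          by_cases hc : pvRk (pvHi g) ≤ pvRk x
          · simp only [hc, not_true, decide_false]
            rw [List.any_eq_false]
            intro y hy
            simp only [decide_eq_true_eq]
            have := pv_sorted_le_getLast g pvRk ihl hy
            omega
          · simp only [hc, not_false_iff, decide_true]
            rw [List.any_eq_true]
            have hmem : pvHi g ∈ PySem.List.sorted g pvRk := List.mem_of_getLast? ihl
            exact ⟨pvHi g, hmem, by simp; omega⟩
        rw [hany]
        by_cases hc : pvRk (pvHi g) ≤ pvRk x <;> simp [hc, ihl]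

theorem pv_pyGet?_zero {α : Type} {xs : List α} (h : xs ≠ []) :
    PySem.List.pyGet? xs 0 = xs.head? := by
  cases xs with
  | nil => exact absurd rfl h
  | cons x t => simp [PySem.List.pyGet?, PySem.List.pyIdx?]

theorem pv_pyGet?_neg_one {α : Type} {xs : List α} (h : xs ≠ []) :
    PySem.List.pyGet? xs (-1) = xs.getLast? := by
  have hl : 0 < xs.length := List.length_pos_iff.2 h
  simp only [PySem.List.pyGet?, PySem.List.pyIdx?]
  rw [if_neg (by omega), if_pos (by omega)]
  simp only [Option.bind_some, List.getLast?_eq_getElem?]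
  norm_num

theorem pv_values_bywindow (summaries : List PvS) :
    (summaries.foldl (fun d s => PySem.Dict.modify d (pvWk s) [] (fun g => g ++ [s])) PySem.Dict.empty).values
      = (PySem.List.dedup (summaries.map pvWk)).map (pvGrp summaries) := by
  have h := pvGD_foldl pvWk ([] : List PvS) (fun g s => g ++ [s]) summaries []
  rw [pvGD_nil] at h
  simp only [List.nil_append] at h
  rw [h]
  simp only [PySem.Dict.values, pvGD, List.map_map]
  apply List.map_congr_left
  intro w _
  show List.foldl (fun g s => g ++ [s]) [] (List.filter (fun s => pvWk s == w) summaries) = _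
  rw [PySem.List.foldl_append_singleton]
  simp [pvGrp]

theorem pv_candidates (summaries : List PvS) :
    ((PySem.List.dedup (summaries.map pvWk)).map (pvGrp summaries)).foldl
      (fun acc g =>
        if g.length < 2 then acc
        else
          let ordered := PySem.List.sorted g pvRk
          match PySem.List.pyGet? ordered 0, PySem.List.pyGet? ordered (-1) with
          | some a, some b => acc ++ [(a, b)]
          | _, _ => acc) []
      = (pvEs summaries).map (pvPair summaries) := by
  rw [List.foldl_map]
  have hstep : (fun (acc : List (PvS × PvS)) (w : Int) =>
      (fun acc g =>
        if g.length < 2 then acc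
        else
          let ordered := PySem.List.sorted g pvRk
          match PySem.List.pyGet? ordered 0, PySem.List.pyGet? ordered (-1) with
          | some a, some b => acc ++ [(a, b)]
          | _, _ => acc) acc (pvGrp summaries w))
      = fun acc w =>
        if decide (2 ≤ (pvGrp summaries w).length) then acc ++ [pvPair summaries w] else acc := by
    funext acc w
    by_cases hl : (pvGrp summaries w).length < 2
    · simp only [hl, if_true]
      have : ¬ (2 ≤ (pvGrp summaries w).length) := by omega
      simp [this]
    · have h2 : 2 ≤ (pvGrp summaries w).length := by omega
      have hne : pvGrp summaries w ≠ [] := by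
        intro he; rw [he] at h2; simp at h2
      have hsne : PySem.List.sorted (pvGrp summaries w) pvRk ≠ [] := by
        simpa [PySem.List.sorted_eq_nil_iff] using hne
      obtain ⟨hh, hlast⟩ := pv_sorted_ends (pvGrp summaries w) hne
      simp only [hl, if_false, pv_pyGet?_zero hsne, pv_pyGet?_neg_one hsne, hh, hlast, h2,
        decide_true, if_true]
      rfl
  rw [hstep, PySem.List.foldl_append_if]
  simp [pvEs]

theorem pv_foldl_count {α : Type} (l : List α) (c : Int) :
    l.foldl (fun b _ => b + 1) c = c + l.length := by
  induction l generalizing c with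
  | nil => simp
  | cons a t ih => simp [ih]; omega

theorem pv_eligible (summaries : List PvS) :
    (PySem.Dict.counter (summaries.map pvWk)).items.foldl
      (fun acc wc => if 2 ≤ wc.2 then acc ++ [wc.1] else acc) []
      = pvEs summaries := by
  have hc : PySem.Dict.counter (summaries.map pvWk)
      = pvGD (fun x : Int => x) (0 : Int) (fun b _ => b + 1) (summaries.map pvWk) := by
    have h := pvGD_foldl (fun x : Int => x) (0 : Int) (fun b _ => b + 1) (summaries.map pvWk) []
    rw [pvGD_nil] at h
    simp only [List.nil_append] at h
    rw [PySem.Dict.counter_eq_foldl]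
    exact h
  rw [hc]
  have hif : (fun (acc : List Int) (wc : Int × Int) => if 2 ≤ wc.2 then acc ++ [wc.1] else acc)
      = fun acc wc => if decide (2 ≤ wc.2) then acc ++ [wc.1] else acc := by
    funext acc wc; by_cases h : 2 ≤ wc.2 <;> simp [h]
  rw [hif, PySem.List.foldl_append_if]
  simp only [pvGD, List.nil_append, List.filter_map, List.map_map]
  have hdd : List.map ((fun x : Int => x) ∘ pvWk) summaries = List.map pvWk summaries := by
    simp [Function.comp]
  have hpq : ∀ w ∈ PySem.List.dedup (List.map pvWk summaries),
      ((fun wc : Int × Int => decide (2 ≤ wc.2)) ∘ (fun w =>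
        (w, List.foldl (fun b (_ : Int) => b + 1) (0 : Int)
          (List.map pvWk (List.filter ((fun s => s == w) ∘ pvWk) summaries))))) w
      = decide (2 ≤ (pvGrp summaries w).length) := by
    intro w _
    simp only [Function.comp, pv_foldl_count, List.length_map, zero_add, decide_eq_decide]
    show (2 : Int) ≤ ((pvGrp summaries w).length : Int) ↔ 2 ≤ (pvGrp summaries w).length
    omega
  rw [hdd, List.filter_congr hpq]
  have hid : (Prod.fst ∘ fun w : Int =>
      (w, List.foldl (fun b (_ : Int) => b + 1) (0 : Int)
        (List.map pvWk (List.filter ((fun s => s == w) ∘ pvWk) summaries)))) = id := rfl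
  rw [hid, List.map_id]
  rfl

theorem pv_foldl_max_mem (er : List Int) (e : Int) : er.foldl max e ∈ e :: er := by
  induction er generalizing e with
  | nil => simp
  | cons a t ih =>
    simp only [List.foldl_cons]
    rcases max_choice e a with h | h <;> rw [h]
    · have := ih e
      rcases List.mem_cons.1 this with h' | h' <;> simp [h']
    · have := ih a
      rcases List.mem_cons.1 this with h' | h' <;> simp [h']

theorem pv_maxfold (P : Int → PvS × PvS) :
    ∀ (er : List Int) (m : Int), (∀ w ∈ m :: er, pvWk (P w).2 = w) → m ∉ er → er.Nodup →
      er.foldl (fun best q =>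
        if pvWk best.2 < pvWk (P q).2 then P q
        else if pvWk (P q).2 = pvWk best.2 ∧ pvRk best.2 < pvRk (P q).2 then P q
        else best) (P m)
      = P (er.foldl max m) := by
  intro er
  induction er with
  | nil => intro m _ _ _; rfl
  | cons a t ih =>
    intro m hkey hm hnd
    have hma : m ≠ a := by
      intro he; exact hm (he ▸ List.mem_cons_self)
    have hkm : pvWk (P m).2 = m := hkey m List.mem_cons_self
    have hka : pvWk (P a).2 = a := hkey a (List.mem_cons.2 (Or.inr List.mem_cons_self))
    simp only [List.foldl_cons]
    have hstep : (if pvWk (P m).2 < pvWk (P a).2 then P a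
        else if pvWk (P a).2 = pvWk (P m).2 ∧ pvRk (P m).2 < pvRk (P a).2 then P a
        else P m) = P (max m a) := by
      rw [hkm, hka]
      by_cases hlt : m < a
      · rw [if_pos hlt, max_eq_right (le_of_lt hlt)]
      · rw [if_neg hlt, if_neg (by rintro ⟨he, _⟩; exact hma he.symm),
          max_eq_left (by omega)]
    rw [hstep]
    apply ih (max m a)
    · intro w hw
      rcases List.mem_cons.1 hw with rfl | hw'
      · rcases max_choice m a with h | h <;> rw [h] <;> assumption
      · exact hkey w (List.mem_cons.2 (Or.inr (List.mem_cons.2 (Or.inr hw'))))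
    · rcases max_choice m a with h | h <;> rw [h]
      · exact fun hc => hm (List.mem_cons.2 (Or.inr hc))
      · exact (List.nodup_cons.1 hnd).1
    · exact (List.nodup_cons.1 hnd).2

theorem pv_hi_mem {g : List PvS} (h : g ≠ []) : pvHi g ∈ g := by
  cases g with
  | nil => exact absurd rfl h
  | cons x t =>
    simp only [pvHi]
    clear h
    induction t generalizing x with
    | nil => simp
    | cons a t ih =>
      simp only [List.foldl_cons]
      by_cases hc : pvRk x ≤ pvRk a
      · simp only [hc, if_true]
        have := ih a
        rcases List.mem_cons.1 this with h' | h' <;> simp [h']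
      · simp only [hc, if_false]
        have := ih x
        rcases List.mem_cons.1 this with h' | h' <;> simp [h']

def pvOm (o : Option PvS) : Option (PvS × Int) := o.map (fun s => (s, pvRk s))

def pvInner (st : Option (PvS × Int) × Option (PvS × Int)) (s : PvS) :
    Option (PvS × Int) × Option (PvS × Int) :=
  let r := pvRk s
  (match st.1 with
    | none => some (s, r)
    | some l => if r < l.2 then some (s, r) else some l,
   match st.2 with
    | none => some (s, r)
    | some h => if h.2 ≤ r then some (s, r) else some h)

def pvOptLo (o : Option PvS) (s : PvS) : Option PvS :=
  match o with
  | none => some s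
  | some l0 => if pvRk s < pvRk l0 then some s else some l0

def pvOptHi (o : Option PvS) (s : PvS) : Option PvS :=
  match o with
  | none => some s
  | some h0 => if pvRk h0 ≤ pvRk s then some s else some h0

theorem pv_scan_split : ∀ (l : List PvS) (a b : Option PvS),
    l.foldl pvInner (pvOm a, pvOm b)
      = (pvOm (l.foldl pvOptLo a), pvOm (l.foldl pvOptHi b)) := by
  intro l
  induction l with
  | nil => intro a b; rfl
  | cons s t ih =>
    intro a b
    simp only [List.foldl_cons]
    have hstep : pvInner (pvOm a, pvOm b) s = (pvOm (pvOptLo a s), pvOm (pvOptHi b s)) := by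
      cases a <;> cases b <;>
        simp only [pvInner, pvOm, pvOptLo, pvOptHi, Option.map_none, Option.map_some] <;>
        refine Prod.ext ?_ ?_ <;> simp only [] <;> (try split) <;> simp
    rw [hstep, ih]

theorem pv_opt_lo (t : List PvS) : ∀ (x : PvS),
    t.foldl pvOptLo (some x) = some (t.foldl (fun b s => if pvRk s < pvRk b then s else b) x) := by
  induction t with
  | nil => intro x; rfl
  | cons a t ih =>
    intro x
    simp only [List.foldl_cons, pvOptLo]
    split <;> rw [ih]

theorem pv_opt_hi (t : List PvS) : ∀ (x : PvS),
    t.foldl pvOptHi (some x) = some (t.foldl (fun b s => if pvRk b ≤ pvRk s then s else b) x) := by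
  induction t with
  | nil => intro x; rfl
  | cons a t ih =>
    intro x
    simp only [List.foldl_cons, pvOptHi]
    split <;> rw [ih]

theorem pv_scan (summaries : List PvS) (m : Int) (h : pvGrp summaries m ≠ []) :
    summaries.foldl
      (fun (st : Option (PvS × Int) × Option (PvS × Int)) s =>
        if pvWk s ≠ m then st else pvInner st s) (none, none)
      = (some (pvLo (pvGrp summaries m), pvRk (pvLo (pvGrp summaries m))),
         some (pvHi (pvGrp summaries m), pvRk (pvHi (pvGrp summaries m)))) := by
  have hguard : (fun (st : Option (PvS × Int) × Option (PvS × Int)) s =>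
        if pvWk s ≠ m then st else pvInner st s)
      = fun st s => if (pvWk s == m) then pvInner st s else st := by
    funext st s
    by_cases hw : pvWk s = m <;> simp [hw]
  rw [hguard]
  have hfil := List.foldl_filter (p := fun s => pvWk s == m) (f := pvInner)
    (l := summaries) (init := ((none, none) : Option (PvS × Int) × Option (PvS × Int)))
  rw [← hfil]
  show (pvGrp summaries m).foldl pvInner (pvOm none, pvOm none) = _
  rw [pv_scan_split]
  rcases hg : pvGrp summaries m with _ | ⟨x, t⟩
  · exact absurd hg h
  · simp only [List.foldl_cons]
    show (pvOm (t.foldl pvOptLo (pvOptLo none x)), pvOm (t.foldl pvOptHi (pvOptHi none x))) = _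
    simp only [pvOptLo, pvOptHi, pv_opt_lo, pv_opt_hi]
    simp [pvOm, pvLo, pvHi]


theorem pv_es_key (summaries : List PvS) {w : Int} (hw : w ∈ pvEs summaries) :
    pvWk (pvPair summaries w).2 = w ∧ 2 ≤ (pvGrp summaries w).length := by
  have hp := List.of_mem_filter hw
  have h2 : 2 ≤ (pvGrp summaries w).length := by simpa using hp
  have hne : pvGrp summaries w ≠ [] := by
    intro he; rw [he] at h2; simp at h2
  have hmem := pv_hi_mem hne
  have := List.of_mem_filter hmem
  refine ⟨by simpa [pvPair] using this, h2⟩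

theorem pv_final (summaries : List (List (String × List (String × Int)))) :
    select_max_row_pair_py summaries = select_max_row_pair_py_alt summaries := by
  simp only [select_max_row_pair_py, select_max_row_pair_py_alt]
  rw [pv_values_bywindow, pv_candidates, pv_eligible]
  rcases hes : pvEs summaries with _ | ⟨e, er⟩
  · simp [PySem.List.max?]
  · have hnd : (pvEs summaries).Nodup := List.Nodup.filter _ (PySem.Set.nodup_ofList _)
    rw [hes] at hnd
    have hkey : ∀ w ∈ e :: er, pvWk (pvPair summaries w).2 = w := by
      intro w hw
      exact (pv_es_key summaries (hes ▸ hw)).1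
    set m := er.foldl max e with hm
    have hmmem : m ∈ pvEs summaries := by
      rw [hes]; exact pv_foldl_max_mem er e
    have hgne : pvGrp summaries m ≠ [] := by
      have h2 := (pv_es_key summaries hmmem).2
      intro he; rw [he] at h2; simp at h2
    simp only [List.map_cons, PySem.List.max?_id_cons]
    rw [← hm, List.foldl_map]
    rw [pv_maxfold (pvPair summaries) er e hkey (List.nodup_cons.1 hnd).1 (List.nodup_cons.1 hnd).2]
    have hs := pv_scan summaries m hgne
    show some (pvPair summaries (er.foldl max e)) =
      (match (List.foldl (fun (st : Option (PvS × Int) × Option (PvS × Int)) s =>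
          if pvWk s ≠ m then st else pvInner st s) (none, none) summaries).1 with
      | none => none
      | some l =>
        match (List.foldl (fun (st : Option (PvS × Int) × Option (PvS × Int)) s =>
            if pvWk s ≠ m then st else pvInner st s) (none, none) summaries).2 with
        | none => none
        | some h => some (l.1, h.1))
    rw [hs]
    rfl

-- ===== VERDICT (by name: the statement is the Claim_ definition above) =====
theorem select_max_row_pair_py_spec : Claim_equal_select_max_row_pair_py := by
  intro summaries _
  unfold Spec_select_max_row_pair_py
  exact pv_final summaries
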